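-- pv_equiv track=rewrite | github.com/coldbell8918/f1tenth_ros2 | f1tenth_gym_ros/fgm _speed.py | find_bounds_of_largest_cluster
-- ===== SOURCE A (Python) =====
-- def find_bounds_of_largest_cluster(clusters):
--
--     largest_indices = [(max(cluster), cluster) for cluster in clusters]
--
--     valid_clusters = [cluster for largest_index, cluster in largest_indices if largest_index <= 800]
--
--     if valid_clusters:
--         next_largest_cluster = max(valid_clusters, key=lambda cluster: max(cluster))
--
--         smallest_index = min(next_largest_cluster)
--         largest_index = max(next_largest_cluster)
--
--         return smallest_index, largest_index
-- ===== SOURCE B (Python) =====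
-- def find_bounds_of_largest_cluster(clusters):
--     best = None
--     best_max = 0
--     for cluster in clusters:
--         m = max(cluster)
--         if m <= 800 and (best is None or m > best_max):
--             best = cluster
--             best_max = m
--     if best is not None:
--         return min(best), best_max
-- ===== Notes on version B (the rewrite author's own statement) =====
-- stated objective: simpler
-- what changed: Replaced A's three-list pipeline (list of (max,cluster) pairs, filtered valid list, then a max(key=...) rescan that recomputes each cluster's max) with a single loop keeping the running best cluster and its max, computing max(cluster) once per cluster.
import Mathlib
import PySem

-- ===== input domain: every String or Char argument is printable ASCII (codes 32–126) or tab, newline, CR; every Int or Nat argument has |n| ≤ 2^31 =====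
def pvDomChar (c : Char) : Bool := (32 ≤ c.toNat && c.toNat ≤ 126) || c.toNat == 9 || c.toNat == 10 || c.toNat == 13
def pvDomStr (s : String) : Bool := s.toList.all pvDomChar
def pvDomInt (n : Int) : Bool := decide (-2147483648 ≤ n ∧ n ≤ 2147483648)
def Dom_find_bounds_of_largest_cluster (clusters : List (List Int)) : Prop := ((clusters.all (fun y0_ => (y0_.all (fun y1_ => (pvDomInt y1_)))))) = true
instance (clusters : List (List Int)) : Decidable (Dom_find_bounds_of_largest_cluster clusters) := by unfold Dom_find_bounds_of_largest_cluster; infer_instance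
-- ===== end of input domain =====

-- B replaces A's three intermediate lists and repeated max(key=...) scan with one fold
-- keeping the running best cluster and its max (objective: simpler).


-- ===== PORT A =====
-- max(cluster)/min(cluster) are PySem.List.max?/min? with identity key; inside Pre_ every
-- cluster is nonempty so the .getD 0 default never fires (Python raises ValueError there).
def find_bounds_of_largest_cluster (clusters : List (List Int)) : Option (Int × Int) :=
  let largest_indices := clusters.map (fun cluster => ((PySem.List.max? cluster (fun x => x)).getD 0, cluster))
  let valid_clusters := (largest_indices.filter (fun p => p.1 ≤ 800)).map (fun p => p.2)
  if valid_clusters ≠ [] then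
    match PySem.List.max? valid_clusters (fun cluster => (PySem.List.max? cluster (fun x => x)).getD 0) with
    | some next_largest_cluster =>
        some ((PySem.List.min? next_largest_cluster (fun x => x)).getD 0,
              (PySem.List.max? next_largest_cluster (fun x => x)).getD 0)
    | none => none
  else
    none

-- ===== PORT B =====
def find_bounds_of_largest_cluster_alt (clusters : List (List Int)) : Option (Int × Int) :=
  let s := clusters.foldl
    (fun (acc : Option (List Int) × Int) cluster =>
      let m := (PySem.List.max? cluster (fun x => x)).getD 0
      if m ≤ 800 ∧ (acc.1.isNone ∨ acc.2 < m) then (some cluster, m) else acc)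
    (none, 0)
  match s.1 with
  | some best => some ((PySem.List.min? best (fun x => x)).getD 0, s.2)
  | none => none

-- ===== PRECONDITION & SPEC =====
-- Pre_ excludes exactly the inputs containing an empty cluster, where Python's max(cluster)
-- raises ValueError (B raises there in the same way).
def Pre_find_bounds_of_largest_cluster (clusters : List (List Int)) : Prop :=
  ∀ c ∈ clusters, c ≠ []
instance (clusters : List (List Int)) : Decidable (Pre_find_bounds_of_largest_cluster clusters) := by
  unfold Pre_find_bounds_of_largest_cluster; infer_instance

def pvWitness_find_bounds_of_largest_cluster : List (List Int) := [[3, 900], [1, 2], [5]]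

def Spec_find_bounds_of_largest_cluster (clusters : List (List Int)) (out : Option (Int × Int)) : Prop := out = find_bounds_of_largest_cluster_alt clusters
instance (clusters : List (List Int)) (out : Option (Int × Int)) : Decidable (Spec_find_bounds_of_largest_cluster clusters out) := by unfold Spec_find_bounds_of_largest_cluster; infer_instance

-- ===== CLAIM (what is proved, stated in full; the proofs are below) =====
def Claim_equal_find_bounds_of_largest_cluster : Prop := ∀ (clusters : List (List Int)), Dom_find_bounds_of_largest_cluster clusters → Pre_find_bounds_of_largest_cluster clusters → Spec_find_bounds_of_largest_cluster clusters (find_bounds_of_largest_cluster clusters)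

-- ===== LEMMAS AND PROOFS =====

-- the key Python's `max(cluster)` computes, totalised exactly as in the ports
def pvKey (c : List Int) : Int := (PySem.List.max? c (fun x => x)).getD 0

-- B's fold step
def pvStep (acc : Option (List Int) × Int) (cluster : List Int) : Option (List Int) × Int :=
  if pvKey cluster ≤ 800 ∧ (acc.1.isNone ∨ acc.2 < pvKey cluster) then (some cluster, pvKey cluster) else acc

-- A's max?-fold step over the filtered list
def pvStepA (acc : Option (List Int)) (x : List Int) : Option (List Int) :=
  match acc with
  | none => some x
  | some m => if pvKey m < pvKey x then some x else some m

def pvInv (a : Option (List Int) × Int) : Prop := ∀ x, a.1 = some x → a.2 = pvKey x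

lemma pvStep_inv (a : Option (List Int) × Int) (c : List Int) (h : pvInv a) :
    pvInv (pvStep a c) := by
  unfold pvStep
  split_ifs with hc
  · intro x hx; cases hx; rfl
  · exact h

lemma pvStep_fst (a : Option (List Int) × Int) (c : List Int) (h : pvInv a) :
    (pvStep a c).1 = if pvKey c ≤ 800 then pvStepA a.1 c else a.1 := by
  obtain ⟨o, m⟩ := a
  cases o with
  | none => by_cases hle : pvKey c ≤ 800 <;> simp [pvStep, pvStepA, hle]
  | some b =>
    have hm : m = pvKey b := h b rfl
    subst hm
    by_cases hle : pvKey c ≤ 800 <;>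
      by_cases hlt : pvKey b < pvKey c <;>
        simp [pvStep, pvStepA, hle, hlt]

lemma pv_fold_fst (cs : List (List Int)) :
    ∀ (a : Option (List Int) × Int), pvInv a →
      (cs.foldl pvStep a).1 = (cs.filter (fun c => pvKey c ≤ 800)).foldl pvStepA a.1 := by
  induction cs with
  | nil => intro a _; rfl
  | cons c t ih =>
    intro a h
    rw [List.foldl_cons, List.filter_cons, ih _ (pvStep_inv a c h), pvStep_fst a c h]
    by_cases hle : pvKey c ≤ 800 <;> simp [hle]

lemma pv_fold_inv (cs : List (List Int)) :
    ∀ (a : Option (List Int) × Int), pvInv a → pvInv (cs.foldl pvStep a) := by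
  induction cs with
  | nil => intro a h; exact h
  | cons c t ih => intro a h; exact ih _ (pvStep_inv a c h)

lemma pv_stepA_ne_none (l : List (List Int)) :
    ∀ (b : List Int), l.foldl pvStepA (some b) ≠ none := by
  induction l with
  | nil => intro b; simp
  | cons x t ih =>
    intro b
    show t.foldl pvStepA (pvStepA (some b) x) ≠ none
    unfold pvStepA
    by_cases h : pvKey b < pvKey x
    · simpa [h] using ih x
    · simpa [h] using ih b

lemma pv_valid_eq (clusters : List (List Int)) :
    ((clusters.map (fun cluster => ((PySem.List.max? cluster (fun x => x)).getD 0, cluster))).filter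
        (fun p => p.1 ≤ 800)).map (fun p => p.2)
      = clusters.filter (fun c => pvKey c ≤ 800) := by
  induction clusters with
  | nil => rfl
  | cons c t ih =>
    simp only [List.map_cons, List.filter_cons]
    by_cases hle : (PySem.List.max? c (fun x => x)).getD 0 ≤ 800
    · have hle' : pvKey c ≤ 800 := hle
      simp [hle, hle', ih]
    · have hle' : ¬ pvKey c ≤ 800 := hle
      simp [hle, hle', ih]

lemma pv_maxA_eq (v : List (List Int)) :
    PySem.List.max? v (fun cluster => (PySem.List.max? cluster (fun x => x)).getD 0)
      = v.foldl pvStepA none := by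
  unfold PySem.List.max?
  congr 1
  funext acc x
  cases acc <;> rfl

-- ===== VERDICT (by name: the statement is the Claim_ definition above) =====
theorem find_bounds_of_largest_cluster_spec : Claim_equal_find_bounds_of_largest_cluster := by
  intro clusters _ _
  unfold Spec_find_bounds_of_largest_cluster
  unfold find_bounds_of_largest_cluster find_bounds_of_largest_cluster_alt
  simp only [pv_valid_eq, pv_maxA_eq]
  have hinv0 : pvInv ((none : Option (List Int)), (0 : Int)) := by intro x hx; cases hx
  have hstep : clusters.foldl
      (fun (acc : Option (List Int) × Int) cluster =>
        let m := (PySem.List.max? cluster (fun x => x)).getD 0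
        if m ≤ 800 ∧ (acc.1.isNone ∨ acc.2 < m) then (some cluster, m) else acc)
      (none, 0) = clusters.foldl pvStep (none, 0) := rfl
  rw [hstep]
  have hfst := pv_fold_fst clusters (none, 0) hinv0
  have hinv := pv_fold_inv clusters (none, 0) hinv0
  set s := clusters.foldl pvStep (none, 0) with hs
  set V := clusters.filter (fun c => pvKey c ≤ 800) with hV
  cases hr : V.foldl pvStepA none with
  | none =>
    have hVnil : V = [] := by
      cases hVc : V with
      | nil => rfl
      | cons a t =>
        exfalso
        apply pv_stepA_ne_none t a
        have : (a :: t).foldl pvStepA none = none := by rw [← hVc]; exact hr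
        simpa [pvStepA] using this
    have hs1 : s.1 = none := hfst.trans hr
    simp [hVnil, hs1]
  | some best =>
    have hne : V ≠ [] := by
      intro h
      rw [h] at hr
      simp at hr
    have hs1 : s.1 = some best := hfst.trans hr
    have hs2 : s.2 = pvKey best := hinv best hs1
    simp only [hne, ne_eq, not_false_iff, if_true, hs1, hs2]
    rfl
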